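-- pv_equiv track=rewrite | github.com/mei-t/algorithm_study | cracking_the_coding_interview/17-7.py | create_name_list2
-- ===== SOURCE A (Python) =====
-- class Graph:
--     def __init__(self, name, count=0, is_visited=False, next=None):
--         self.name = name
--         self.count = count
--         self.is_visited = is_visited
--         self.next = next
--         self.neighbors = []
--
-- def create_new_graph(names, i, name_map):
--     if i >= len(names):
--         return None
--
--     graph = Graph(names[i][0], names[i][1])
--     graph.next = create_new_graph(names, i + 1, name_map)
--     name_map[names[i][0]] = graph
--     return graph
--
-- def create_name_list2(names, synonyms):
--     names = list(names.items())
--     name_map = dict()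
--     root = create_new_graph(names, 0, name_map)
--
--     for synonym in synonyms:
--         if synonym[0] not in name_map:
--             name_map[synonym[0]] = Graph(synonym[0])
--         if synonym[1] not in name_map:
--             name_map[synonym[1]] = Graph(synonym[1])
--
--         name_map[synonym[0]].neighbors.append(name_map[synonym[1]])
--         name_map[synonym[1]].neighbors.append(name_map[synonym[0]])
--
--     res = dict()
--     current = root
--     while current:
--         if current.is_visited:
--             current = current.next
--             continue
--
--         current.is_visited = True
--         res[current.name] = current.count
--         for neighbor in current.neighbors:
--             if neighbor.is_visited:
--                 continue
--             neighbor.is_visited = True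
--             res[current.name] += neighbor.count
--
--         current = current.next
--     return res
-- ===== SOURCE B (Python) =====
-- def create_name_list2(names, synonyms):
--     # Stage 1: adjacency from synonyms.
--     adj = {}
--     for a, b in synonyms:
--         adj.setdefault(a, []).append(b)
--         adj.setdefault(b, []).append(a)
--     counts = dict(names)
--     # Stage 2: ownership assignment — each name either claims itself and its
--     # still-unclaimed neighbours, or was already claimed by an earlier owner.
--     owner = {}
--     for name in counts:
--         if name not in owner:
--             owner[name] = name
--             for nb in adj.get(name, []):
--                 if nb not in owner:
--                     owner[nb] = name
--     # Stage 3: group-by sum of the counts under their owner.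
--     res = {}
--     for x, c in counts.items():
--         o = owner[x]
--         res[o] = res.get(o, 0) + c
--     return res
-- ===== Notes on version B (the rewrite author's own statement) =====
-- stated objective: alternative
-- what changed: Drops the Graph node class, the recursive linked-list construction and A's single interleaved visit-and-sum traversal; B works in three staged passes: build an adjacency dict, compute an ownership map assigning every name to the first name that claims it, then produce the result by a group-by sum of the counts under their owners.
import Mathlib
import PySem

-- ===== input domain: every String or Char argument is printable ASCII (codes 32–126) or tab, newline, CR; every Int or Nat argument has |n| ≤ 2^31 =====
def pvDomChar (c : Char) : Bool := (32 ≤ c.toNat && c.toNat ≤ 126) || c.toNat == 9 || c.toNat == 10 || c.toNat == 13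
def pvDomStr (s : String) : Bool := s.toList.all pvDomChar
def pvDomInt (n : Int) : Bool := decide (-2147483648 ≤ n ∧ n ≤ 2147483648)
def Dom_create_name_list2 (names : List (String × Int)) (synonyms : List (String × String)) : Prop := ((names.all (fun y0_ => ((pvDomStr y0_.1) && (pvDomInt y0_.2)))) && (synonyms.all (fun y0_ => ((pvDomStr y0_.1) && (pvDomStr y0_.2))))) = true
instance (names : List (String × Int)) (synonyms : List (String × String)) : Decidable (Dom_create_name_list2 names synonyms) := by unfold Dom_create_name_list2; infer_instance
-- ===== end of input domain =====

-- B replaces A's Graph class, recursive linked-list build and interleaved visited/summing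
-- traversal by three staged passes: adjacency dict, an ownership map, then a group-by sum
-- (objective: alternative decomposition, same asymptotic cost).

-- ===== PORT A =====
-- A mutates Graph objects shared between the linked list and the dict name_map; since
-- name_map is a dict, each name has exactly one node, so a node is identified by its name
-- and the shared mutable object state is modelled as a Dict String PyNode (exact).
-- The `next` chain built by create_new_graph links the nodes in the order of the
-- `names` item list, so the while-loop walks exactly that list (walk_list below).
structure PyNode where
  count : Int
  visited : Bool
  neighbors : List String
deriving Repr, DecidableEq

def pyNode0 : PyNode := ⟨0, false, []⟩

-- Python receives `names` as a dict; the association-list argument is that dict's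
-- construction (insert in order, overwrite in place), and `list(names.items())` is .items.
def namesDict (names : List (String × Int)) : PySem.Dict String Int :=
  names.foldl (fun d p => d.insert p.1 p.2) PySem.Dict.empty

def create_new_graph (namesL : List (String × Int)) (i : Nat)
    (name_map : PySem.Dict String PyNode) : PySem.Dict String PyNode :=
  if _h : namesL.length ≤ i then name_map
  else
    let m := create_new_graph namesL (i + 1) name_map
    m.insert (namesL.getD i ("", 0)).1 ⟨(namesL.getD i ("", 0)).2, false, []⟩
termination_by namesL.length - i
decreasing_by omega

def add_synonym (m : PySem.Dict String PyNode) (synonym : String × String) :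
    PySem.Dict String PyNode :=
  let m := if m.contains synonym.1 then m else m.insert synonym.1 pyNode0
  let m := if m.contains synonym.2 then m else m.insert synonym.2 pyNode0
  let m := m.modify synonym.1 pyNode0 (fun n => { n with neighbors := n.neighbors ++ [synonym.2] })
  m.modify synonym.2 pyNode0 (fun n => { n with neighbors := n.neighbors ++ [synonym.1] })

def neighbor_step (name : String)
    (st : PySem.Dict String PyNode × PySem.Dict String Int) (nb : String) :
    PySem.Dict String PyNode × PySem.Dict String Int :=
  let node := st.1.getD nb pyNode0
  if node.visited then st
  else (st.1.modify nb pyNode0 (fun n => { n with visited := true }),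
        st.2.insert name (st.2.getD name 0 + node.count))

def walk_list : List (String × Int) → PySem.Dict String PyNode → PySem.Dict String Int →
    PySem.Dict String Int
  | [], _, res => res
  | (name, _) :: rest, m, res =>
      let node := m.getD name pyNode0
      if node.visited then walk_list rest m res
      else
        let m := m.modify name pyNode0 (fun n => { n with visited := true })
        let res := res.insert name node.count
        let st := node.neighbors.foldl (neighbor_step name) (m, res)
        walk_list rest st.1 st.2

def create_name_list2 (names : List (String × Int)) (synonyms : List (String × String)) :
    List (String × Int) :=
  let namesL := (namesDict names).items
  let name_map := create_new_graph namesL 0 PySem.Dict.empty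
  let name_map := synonyms.foldl add_synonym name_map
  (walk_list namesL name_map PySem.Dict.empty).items

-- ===== PORT B =====
-- adj.setdefault(a, []).append(b) is exactly modify a [] (· ++ [b]).
def build_adj (synonyms : List (String × String)) : PySem.Dict String (List String) :=
  synonyms.foldl (fun d s => (d.modify s.1 [] (· ++ [s.2])).modify s.2 [] (· ++ [s.1]))
    PySem.Dict.empty

def ownStep (name : String) (owner : PySem.Dict String String) (nb : String) :
    PySem.Dict String String :=
  if owner.contains nb then owner else owner.insert nb name

-- stage 2: `for name in counts: if name not in owner: owner[name]=name; for nb in adj.get(name,[]) …`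
def build_owner (adj : PySem.Dict String (List String)) :
    List String → PySem.Dict String String → PySem.Dict String String
  | [], owner => owner
  | name :: rest, owner =>
      if owner.contains name then build_owner adj rest owner
      else build_owner adj rest ((adj.getD name []).foldl (ownStep name) (owner.insert name name))

-- stage 3 body: owner[x] never raises (every counts key is in owner), so the
-- getD with default x is exact there.
def agg_step (owner : PySem.Dict String String) (res : PySem.Dict String Int)
    (p : String × Int) : PySem.Dict String Int :=
  let o := (owner.get? p.1).getD p.1
  res.insert o (res.getD o 0 + p.2)

def create_name_list2_alt (names : List (String × Int)) (synonyms : List (String × String)) :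
    List (String × Int) :=
  let adj := build_adj synonyms
  let counts := names.foldl (fun d p => d.insert p.1 p.2) PySem.Dict.empty
  let owner := build_owner adj counts.keys PySem.Dict.empty
  (counts.items.foldl (agg_step owner) PySem.Dict.empty).items

-- ===== PRECONDITION & SPEC =====
def Spec_create_name_list2 (names : List (String × Int)) (synonyms : List (String × String)) (out : List (String × Int)) : Prop := out = create_name_list2_alt names synonyms
instance (names : List (String × Int)) (synonyms : List (String × String)) (out : List (String × Int)) : Decidable (Spec_create_name_list2 names synonyms out) := by unfold Spec_create_name_list2; infer_instance

-- ===== CLAIM (what is proved, stated in full; the proofs are below) =====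
def Claim_equal_create_name_list2 : Prop := ∀ (names : List (String × Int)) (synonyms : List (String × String)), Dom_create_name_list2 names synonyms → Spec_create_name_list2 names synonyms (create_name_list2 names synonyms)

-- ===== LEMMAS AND PROOFS =====

-- The claiming process both programs induce, as pure data: grabList collects the
-- still-unclaimed neighbours, groups lists (owner, members) in claiming order.
def grabList : PySem.Set String → List String → PySem.Set String × List String
  | v, [] => (v, [])
  | v, nb :: rest =>
      if v.contains nb then grabList v rest
      else
        let p := grabList (v.add nb) rest
        (p.1, nb :: p.2)

def groups (adj : PySem.Dict String (List String)) :
    List String → PySem.Set String → List (String × List String)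
  | [], _ => []
  | n :: rest, v =>
      if v.contains n then groups adj rest v
      else
        let p := grabList (v.add n) (adj.getD n [])
        (n, n :: p.2) :: groups adj rest p.1

def sumMem (counts : PySem.Dict String Int) (mem : List String) : Int :=
  (mem.map (fun x => counts.getD x 0)).sum

def groupsFold (counts : PySem.Dict String Int) (res : PySem.Dict String Int)
    (gs : List (String × List String)) : PySem.Dict String Int :=
  gs.foldl (fun r g => r.insert g.1 (sumMem counts g.2)) res

def gfind : List (String × List String) → String → Option String
  | [], _ => none
  | g :: gs, x => if x ∈ g.2 then some g.1 else gfind gs x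

-- the explicit group-by result of stage 3 after processing `done`
def specL (F : String → String) (done : List (String × Int)) : List (String × Int) :=
  ((done.map (·.1)).filter (fun k => F k == k)).map
    (fun o => (o, ((done.filter (fun p => F p.1 == o)).map (·.2)).sum))

-- ---- A-side: the node map as a function of counts / visited set / adjacency ----
def NodeInv (m : PySem.Dict String PyNode) (counts : PySem.Dict String Int)
    (v : PySem.Set String) (adj : PySem.Dict String (List String)) : Prop :=
  ∀ k, m.getD k pyNode0 = ⟨counts.getD k 0, decide (k ∈ v), adj.getD k []⟩

theorem cng_getD (namesL : List (String × Int)) (i : Nat) (m : PySem.Dict String PyNode)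
    (k : String) :
    (create_new_graph namesL i m).getD k pyNode0 =
      match (namesL.drop i).find? (fun p => p.1 == k) with
      | some p => ⟨p.2, false, []⟩
      | none => m.getD k pyNode0 := by
  fun_induction create_new_graph namesL i m with
  | case1 i h =>
    simp [List.drop_eq_nil_of_le h]
  | case2 i h m' ih =>
    have hi : i < namesL.length := by omega
    have hget : namesL.getD i ("", 0) = namesL[i] := by
      simp [List.getD_eq_getElem?_getD, List.getElem?_eq_getElem hi]
    rw [List.drop_eq_getElem_cons hi, List.find?_cons, PySem.Dict.getD_insert, hget,
      show m' = create_new_graph namesL (i + 1) m from rfl, ih]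
    by_cases hk : namesL[i].1 = k
    · simp [hk]
    · rw [beq_eq_false_iff_ne.mpr hk]
      simp [Ne.symm hk]

theorem namesDict_keys_nodup (names : List (String × Int)) : (namesDict names).keys.Nodup := by
  unfold namesDict
  exact PySem.Dict.nodup_keys_foldl_insert_key names Prod.fst (fun _ p => p.2) _
    PySem.Dict.nodup_keys_empty

theorem getD_of_not_contains {ν : Type} (d : PySem.Dict String ν) (k : String)
    (h : d.contains k = false) (d0 : ν) : d.getD k d0 = d0 := by
  simp [PySem.Dict.getD, (PySem.Dict.get?_eq_none_iff_contains d k).mpr h]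

theorem init_inv (names : List (String × Int)) (k : String) :
    (create_new_graph (namesDict names).items 0 PySem.Dict.empty).getD k pyNode0 =
      ⟨(namesDict names).getD k 0, false, []⟩ := by
  rw [cng_getD]
  simp only [List.drop_zero]
  cases h : (namesDict names).items.find? (fun p => p.1 == k) with
  | none =>
    have hk : k ∉ (namesDict names).keys := by
      intro hk
      simp only [PySem.Dict.keys, List.mem_map] at hk
      obtain ⟨p, hp, rfl⟩ := hk
      have := List.find?_eq_none.mp h p hp
      simp at this
    have h2 : (namesDict names).get? k = none :=
      (PySem.Dict.get?_eq_none_iff_not_mem_keys _ _).mpr hk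
    simp [PySem.Dict.getD, h2, pyNode0, PySem.Dict.get?_empty]
  | some p =>
    have h1 : p.1 = k := by have := List.find?_some h; simpa using this
    have h2 : (k, p.2) ∈ (namesDict names).items := by
      rw [← h1]; exact List.mem_of_find?_eq_some h
    rw [PySem.Dict.getD_of_mem_items _ h2 (namesDict_keys_nodup names) 0]

theorem modify_pair_inv (c : PySem.Dict String Int) (m2 : PySem.Dict String PyNode)
    (a : PySem.Dict String (List String)) (s : String × String)
    (h2 : ∀ k, m2.getD k pyNode0 = ⟨c.getD k 0, false, a.getD k []⟩) (k : String) :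
    ((m2.modify s.1 pyNode0 (fun n => { n with neighbors := n.neighbors ++ [s.2] })).modify
        s.2 pyNode0 (fun n => { n with neighbors := n.neighbors ++ [s.1] })).getD k pyNode0 =
      ⟨c.getD k 0, false,
        ((a.modify s.1 [] (· ++ [s.2])).modify s.2 [] (· ++ [s.1])).getD k []⟩ := by
  simp only [PySem.Dict.getD_modify, h2]
  split_ifs <;> simp_all

theorem setdefault_node_getD (m' : PySem.Dict String PyNode) (x k : String) :
    (if m'.contains x then m' else m'.insert x pyNode0).getD k pyNode0 =
      m'.getD k pyNode0 := by
  by_cases hc : m'.contains x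
  · simp [hc]
  · simp only [hc, Bool.false_eq_true, if_false]
    rw [PySem.Dict.getD_insert]
    by_cases hk : k = x
    · subst hk
      rw [getD_of_not_contains m' k (by simpa using hc)]
      simp
    · simp [hk]

theorem add_synonym_inv (c : PySem.Dict String Int) (m : PySem.Dict String PyNode)
    (a : PySem.Dict String (List String)) (s : String × String)
    (h : ∀ k, m.getD k pyNode0 = ⟨c.getD k 0, false, a.getD k []⟩) (k : String) :
    (add_synonym m s).getD k pyNode0 =
      ⟨c.getD k 0, false,
        ((a.modify s.1 [] (· ++ [s.2])).modify s.2 [] (· ++ [s.1])).getD k []⟩ := by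
  unfold add_synonym
  exact modify_pair_inv c _ a s
    (fun k => (setdefault_node_getD _ s.2 k).trans ((setdefault_node_getD m s.1 k).trans (h k))) k

theorem build_fold_inv (c : PySem.Dict String Int) :
    ∀ (synonyms : List (String × String)) (m : PySem.Dict String PyNode)
      (a : PySem.Dict String (List String)),
      (∀ k, m.getD k pyNode0 = ⟨c.getD k 0, false, a.getD k []⟩) →
      ∀ k, (synonyms.foldl add_synonym m).getD k pyNode0 =
        ⟨c.getD k 0, false,
          (synonyms.foldl
            (fun d s => (d.modify s.1 [] (· ++ [s.2])).modify s.2 [] (· ++ [s.1])) a).getD k []⟩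
  | [], m, a, h => h
  | s :: rest, m, a, h => by
    simp only [List.foldl_cons]
    exact build_fold_inv c rest _ _ (add_synonym_inv c m a s h)

theorem build_inv (names : List (String × Int)) (synonyms : List (String × String)) :
    NodeInv (synonyms.foldl add_synonym
        (create_new_graph (namesDict names).items 0 PySem.Dict.empty))
      (namesDict names) PySem.Set.empty (build_adj synonyms) := by
  intro k
  rw [build_fold_inv (namesDict names) synonyms _ PySem.Dict.empty
    (fun k => by rw [init_inv]; simp [PySem.Dict.getD, PySem.Dict.get?_empty])]
  simp [build_adj, PySem.Set.empty]

theorem mark_inv (counts : PySem.Dict String Int) (adj : PySem.Dict String (List String))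
    (m : PySem.Dict String PyNode) (v : PySem.Set String) (x : String)
    (h : NodeInv m counts v adj) :
    NodeInv (m.modify x pyNode0 (fun n => { n with visited := true })) counts (v.add x) adj := by
  intro k
  rw [PySem.Dict.getD_modify]
  by_cases hk : k = x
  · subst hk; simp [h k, PySem.Set.mem_add]
  · simp [hk, h k, PySem.Set.mem_add]

-- ---- grabList facts ----
theorem grabList_spec (nbrs : List String) : ∀ (v : PySem.Set String),
    (∀ x, x ∈ (grabList v nbrs).1 ↔ x ∈ v ∨ x ∈ (grabList v nbrs).2) ∧
    (∀ x ∈ (grabList v nbrs).2, x ∉ v) ∧ (grabList v nbrs).2.Nodup := by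
  induction nbrs with
  | nil =>
    intro v
    exact ⟨fun x => by simp [grabList], fun x hx => by simp [grabList] at hx, by simp [grabList]⟩
  | cons nb rest ih =>
    intro v
    by_cases hv : nb ∈ v
    · have hc : v.contains nb = true := (PySem.Set.contains_iff v nb).mpr hv
      simp only [grabList, hc, if_true]
      exact ih v
    · have hc : v.contains nb = false := by
        rcases h : v.contains nb with _ | _
        · rfl
        · exact absurd ((PySem.Set.contains_iff v nb).mp h) hv
      simp only [grabList, hc, Bool.false_eq_true, if_false]
      obtain ⟨i1, i2, i3⟩ := ih (v.add nb)
      refine ⟨fun x => ?_, fun x hx => ?_, ?_⟩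
      · rw [i1 x, PySem.Set.mem_add]
        simp only [List.mem_cons]
        tauto
      · simp only [List.mem_cons] at hx
        rcases hx with rfl | hx
        · exact hv
        · have := i2 x hx
          rw [PySem.Set.mem_add] at this
          tauto
      · refine List.nodup_cons.mpr ⟨fun hmem => ?_, i3⟩
        have := i2 nb hmem
        rw [PySem.Set.mem_add] at this
        tauto

-- ---- A's walk computes the fold over groups ----
theorem innerA (counts : PySem.Dict String Int) (adj : PySem.Dict String (List String))
    (nbrs : List String) :
    ∀ (m : PySem.Dict String PyNode) (v : PySem.Set String) (res : PySem.Dict String Int)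
      (name : String) (t : Int), NodeInv m counts v adj →
      NodeInv (nbrs.foldl (neighbor_step name) (m, res.insert name t)).1 counts
          (grabList v nbrs).1 adj ∧
        (nbrs.foldl (neighbor_step name) (m, res.insert name t)).2 =
          res.insert name (t + sumMem counts (grabList v nbrs).2) := by
  induction nbrs with
  | nil =>
    intro m v res name t h
    refine ⟨h, ?_⟩
    simp [grabList, sumMem]
  | cons nb rest ih =>
    intro m v res name t h
    by_cases hv : nb ∈ v
    · have hA : neighbor_step name (m, res.insert name t) nb = (m, res.insert name t) := by
        simp [neighbor_step, h nb, hv]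
      have hc : v.contains nb = true := (PySem.Set.contains_iff v nb).mpr hv
      simp only [List.foldl_cons, hA, grabList, hc, if_true]
      exact ih m v res name t h
    · have hc : v.contains nb = false := by
        rcases h' : v.contains nb with _ | _
        · rfl
        · exact absurd ((PySem.Set.contains_iff v nb).mp h') hv
      have hA : neighbor_step name (m, res.insert name t) nb =
          (m.modify nb pyNode0 (fun n => { n with visited := true }),
            res.insert name (t + counts.getD nb 0)) := by
        simp [neighbor_step, h nb, hv, PySem.Dict.getD_insert_self,
          PySem.Dict.insert_insert_self]
      simp only [List.foldl_cons, hA, grabList, hc, Bool.false_eq_true, if_false]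
      obtain ⟨j1, j2⟩ := ih _ (v.add nb) res name (t + counts.getD nb 0)
        (mark_inv counts adj m v nb h)
      refine ⟨j1, ?_⟩
      rw [j2]
      congr 1
      simp only [sumMem, List.map_cons, List.sum_cons]
      ring

theorem walk_groups (counts : PySem.Dict String Int) (adj : PySem.Dict String (List String)) :
    ∀ (order : List (String × Int)) (m : PySem.Dict String PyNode) (v : PySem.Set String)
      (res : PySem.Dict String Int), NodeInv m counts v adj →
      walk_list order m res = groupsFold counts res (groups adj (order.map (·.1)) v) := by
  intro order
  induction order with
  | nil => intro m v res h; simp [walk_list, groups, groupsFold]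
  | cons p rest ih =>
    obtain ⟨name, cnt⟩ := p
    intro m v res h
    by_cases hv : name ∈ v
    · have hcond : (m.getD name pyNode0).visited = true := by rw [h name]; simp [hv]
      have hc : v.contains name = true := (PySem.Set.contains_iff v name).mpr hv
      simp only [walk_list, List.map_cons, hcond, if_true, groups, hc]
      exact ih m v res h
    · have hcond : (m.getD name pyNode0).visited = false := by rw [h name]; simp [hv]
      have hc : v.contains name = false := by
        rcases h' : v.contains name with _ | _
        · rfl
        · exact absurd ((PySem.Set.contains_iff v name).mp h') hv
      have hnb : (m.getD name pyNode0).neighbors = adj.getD name [] := by rw [h name]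
      have hcnt : (m.getD name pyNode0).count = counts.getD name 0 := by rw [h name]
      simp only [walk_list, List.map_cons, hcond, Bool.false_eq_true, if_false, hnb, hcnt,
        groups, hc]
      obtain ⟨hinv, hres⟩ := innerA counts adj (adj.getD name [])
        (m.modify name pyNode0 (fun n => { n with visited := true })) (v.add name) res name
        (counts.getD name 0) (mark_inv counts adj m v name h)
      rw [hres, ih _ _ _ hinv]
      simp only [groupsFold, List.foldl_cons]
      congr 2

-- ---- B's owner map computes gfind over groups ----
theorem owner_inner (n : String) (nbrs : List String) :
    ∀ (O : PySem.Dict String String) (v : PySem.Set String),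
      (∀ x, O.contains x = true ↔ x ∈ v) →
      (∀ x, (nbrs.foldl (ownStep n) O).get? x =
        if x ∈ (grabList v nbrs).2 then some n else O.get? x) ∧
      (∀ x, (nbrs.foldl (ownStep n) O).contains x = true ↔ x ∈ (grabList v nbrs).1) := by
  induction nbrs with
  | nil =>
    intro O v h
    exact ⟨fun x => by simp [grabList], fun x => by simp only [List.foldl_nil, grabList]; exact h x⟩
  | cons nb rest ih =>
    intro O v h
    by_cases hv : nb ∈ v
    · have hc : v.contains nb = true := (PySem.Set.contains_iff v nb).mpr hv
      have hO : O.contains nb = true := (h nb).mpr hv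
      simp only [List.foldl_cons, ownStep, hO, if_true, grabList, hc]
      exact ih O v h
    · have hc : v.contains nb = false := by
        rcases h' : v.contains nb with _ | _
        · rfl
        · exact absurd ((PySem.Set.contains_iff v nb).mp h') hv
      have hO : O.contains nb = false := by
        rcases h' : O.contains nb with _ | _
        · rfl
        · exact absurd ((h nb).mp h') hv
      simp only [List.foldl_cons, ownStep, hO, Bool.false_eq_true, if_false, grabList, hc]
      have h' : ∀ x, (O.insert nb n).contains x = true ↔ x ∈ v.add nb := by
        intro x
        rw [PySem.Dict.contains_insert, PySem.Set.mem_add]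
        simp only [Bool.or_eq_true, beq_iff_eq, h x]
        tauto
      obtain ⟨g1, g2⟩ := ih (O.insert nb n) (v.add nb) h'
      refine ⟨fun x => ?_, fun x => g2 x⟩
      rw [g1 x]
      by_cases hx2 : x ∈ (grabList (v.add nb) rest).2
      · rw [if_pos hx2, if_pos (List.mem_cons_of_mem _ hx2)]
      · rw [if_neg hx2]
        by_cases hxn : x = nb
        · subst hxn
          rw [PySem.Dict.get?_insert_self, if_pos (List.mem_cons_self)]
        · rw [PySem.Dict.get?_insert_of_ne _ _ hxn, if_neg (by
            simp only [List.mem_cons]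
            tauto)]

theorem owner_main (adj : PySem.Dict String (List String)) :
    ∀ (ks : List String) (O : PySem.Dict String String) (v : PySem.Set String),
      (∀ x, O.contains x = true ↔ x ∈ v) →
      ∀ x, (build_owner adj ks O).get? x =
        if x ∈ v then O.get? x else gfind (groups adj ks v) x := by
  intro ks
  induction ks with
  | nil =>
    intro O v h x
    by_cases hx : x ∈ v
    · simp [build_owner, hx]
    · have hO : O.contains x = false := by
        rcases hc : O.contains x with _ | _
        · rfl
        · exact absurd ((h x).mp hc) hx
      simp [build_owner, groups, gfind, hx,
        (PySem.Dict.get?_eq_none_iff_contains O x).mpr hO]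
  | cons n rest ih =>
    intro O v h x
    by_cases hn : n ∈ v
    · have hc : v.contains n = true := (PySem.Set.contains_iff v n).mpr hn
      have hO : O.contains n = true := (h n).mpr hn
      simp only [build_owner, hO, if_true, groups, hc]
      exact ih O v h x
    · have hc : v.contains n = false := by
        rcases h' : v.contains n with _ | _
        · rfl
        · exact absurd ((PySem.Set.contains_iff v n).mp h') hn
      have hO : O.contains n = false := by
        rcases h' : O.contains n with _ | _
        · rfl
        · exact absurd ((h n).mp h') hn
      simp only [build_owner, hO, Bool.false_eq_true, if_false, groups, hc]
      have h0 : ∀ y, (O.insert n n).contains y = true ↔ y ∈ v.add n := by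
        intro y
        rw [PySem.Dict.contains_insert, PySem.Set.mem_add]
        simp only [Bool.or_eq_true, beq_iff_eq, h y]
        tauto
      obtain ⟨g1, g2⟩ := owner_inner n (adj.getD n []) (O.insert n n) (v.add n) h0
      rw [ih _ _ g2 x]
      obtain ⟨c1, c2, c3⟩ := grabList_spec (adj.getD n []) (v.add n)
      by_cases hx : x ∈ v
      · have hxn : x ≠ n := fun he => hn (he ▸ hx)
        have hxa : x ∈ v.add n := (PySem.Set.mem_add v n x).mpr (Or.inl hx)
        have hx1 : x ∈ (grabList (v.add n) (adj.getD n [])).1 := (c1 x).mpr (Or.inl hxa)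
        have hxp : x ∉ (grabList (v.add n) (adj.getD n [])).2 := fun hm => (c2 x hm) hxa
        rw [if_pos hx1, g1 x, if_neg hxp, PySem.Dict.get?_insert_of_ne _ _ hxn, if_pos hx]
      · rw [if_neg hx]
        by_cases hmem : x ∈ n :: (grabList (v.add n) (adj.getD n [])).2
        · have hx1 : x ∈ (grabList (v.add n) (adj.getD n [])).1 := by
            rcases List.mem_cons.mp hmem with rfl | hp2
            · exact (c1 x).mpr (Or.inl ((PySem.Set.mem_add v x x).mpr (Or.inr rfl)))
            · exact (c1 x).mpr (Or.inr hp2)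
          rw [if_pos hx1, g1 x]
          have hg : gfind ((n, n :: (grabList (v.add n) (adj.getD n [])).2) ::
              groups adj rest (grabList (v.add n) (adj.getD n [])).1) x = some n := by
            simp only [gfind, if_pos hmem]
          rw [hg]
          rcases List.mem_cons.mp hmem with rfl | hp2
          · have hnp : x ∉ (grabList (v.add x) (adj.getD x [])).2 := fun hm =>
              (c2 x hm) ((PySem.Set.mem_add v x x).mpr (Or.inr rfl))
            rw [if_neg hnp, PySem.Dict.get?_insert_self]
          · rw [if_pos hp2]
        · have hxn : x ≠ n := fun he => hmem (he ▸ List.mem_cons_self)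
          have hxp : x ∉ (grabList (v.add n) (adj.getD n [])).2 := fun hm =>
            hmem (List.mem_cons_of_mem _ hm)
          have hx1 : x ∉ (grabList (v.add n) (adj.getD n [])).1 := by
            rw [c1 x, PySem.Set.mem_add]
            push Not
            exact ⟨⟨hx, hxn⟩, hxp⟩
          rw [if_neg hx1]
          simp only [gfind, if_neg hmem]

-- ---- structural facts about groups ----
theorem groups_spec (adj : PySem.Dict String (List String)) :
    ∀ (ks : List String) (v : PySem.Set String),
      (∀ g ∈ groups adj ks v, (∀ x ∈ g.2, x ∉ v) ∧ g.2.Nodup ∧ g.1 ∈ g.2) ∧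
      (groups adj ks v).Pairwise (fun g h => ∀ x ∈ g.2, x ∉ h.2) := by
  intro ks
  induction ks with
  | nil => intro v; exact ⟨by simp [groups], by simp [groups]⟩
  | cons n rest ih =>
    intro v
    by_cases hn : n ∈ v
    · have hc : v.contains n = true := (PySem.Set.contains_iff v n).mpr hn
      simp only [groups, hc, if_true]
      exact ih v
    · have hc : v.contains n = false := by
        rcases h' : v.contains n with _ | _
        · rfl
        · exact absurd ((PySem.Set.contains_iff v n).mp h') hn
      simp only [groups, hc, Bool.false_eq_true, if_false]
      obtain ⟨c1, c2, c3⟩ := grabList_spec (adj.getD n []) (v.add n)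
      obtain ⟨r1, r2⟩ := ih (grabList (v.add n) (adj.getD n [])).1
      constructor
      · intro g hg
        rcases List.mem_cons.mp hg with rfl | hg'
        · refine ⟨?_, ?_, List.mem_cons_self⟩
          · intro x hx
            rcases List.mem_cons.mp hx with rfl | hx2
            · exact hn
            · exact fun hxv => (c2 x hx2) ((PySem.Set.mem_add v n x).mpr (Or.inl hxv))
          · exact List.nodup_cons.mpr
              ⟨fun hm => (c2 n hm) ((PySem.Set.mem_add v n n).mpr (Or.inr rfl)), c3⟩
        · obtain ⟨a1, a2, a3⟩ := r1 g hg'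
          exact ⟨fun x hx hxv =>
            a1 x hx ((c1 x).mpr (Or.inl ((PySem.Set.mem_add v n x).mpr (Or.inl hxv)))), a2, a3⟩
      · refine List.pairwise_cons.mpr ⟨?_, r2⟩
        intro g hg x hx
        have hx1 : x ∈ (grabList (v.add n) (adj.getD n [])).1 := by
          rcases List.mem_cons.mp hx with rfl | hx2
          · exact (c1 x).mpr (Or.inl ((PySem.Set.mem_add v x x).mpr (Or.inr rfl)))
          · exact (c1 x).mpr (Or.inr hx2)
        exact fun hxg => (r1 g hg).1 x hxg hx1

theorem groups_cover (adj : PySem.Dict String (List String)) :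
    ∀ (ks : List String) (v : PySem.Set String), ∀ k ∈ ks,
      k ∈ v ∨ ∃ g ∈ groups adj ks v, k ∈ g.2 := by
  intro ks
  induction ks with
  | nil => intro v k hk; simp at hk
  | cons n rest ih =>
    intro v k hk
    by_cases hn : n ∈ v
    · have hc : v.contains n = true := (PySem.Set.contains_iff v n).mpr hn
      simp only [groups, hc, if_true]
      rcases List.mem_cons.mp hk with rfl | hk'
      · exact Or.inl hn
      · exact ih v k hk'
    · have hc : v.contains n = false := by
        rcases h' : v.contains n with _ | _
        · rfl
        · exact absurd ((PySem.Set.contains_iff v n).mp h') hn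
      simp only [groups, hc, Bool.false_eq_true, if_false]
      obtain ⟨c1, c2, c3⟩ := grabList_spec (adj.getD n []) (v.add n)
      rcases List.mem_cons.mp hk with rfl | hk'
      · exact Or.inr ⟨_, List.mem_cons_self, List.mem_cons_self⟩
      · rcases ih (grabList (v.add n) (adj.getD n [])).1 k hk' with hin | ⟨g, hg, hgx⟩
        · rcases (c1 k).mp hin with ha | hp2
          · rcases (PySem.Set.mem_add v n k).mp ha with hkv | rfl
            · exact Or.inl hkv
            · exact Or.inr ⟨_, List.mem_cons_self, List.mem_cons_self⟩
          · exact Or.inr ⟨_, List.mem_cons_self, List.mem_cons_of_mem _ hp2⟩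
        · exact Or.inr ⟨g, List.mem_cons_of_mem _ hg, hgx⟩

theorem gfind_eq_of_mem (gs : List (String × List String))
    (hdisj : gs.Pairwise (fun g h => ∀ x ∈ g.2, x ∉ h.2)) :
    ∀ g ∈ gs, ∀ x ∈ g.2, gfind gs x = some g.1 := by
  induction gs with
  | nil => intro g hg; cases hg
  | cons g0 gs ih =>
    obtain ⟨hd, hp⟩ := List.pairwise_cons.mp hdisj
    intro g hg x hx
    rcases List.mem_cons.mp hg with rfl | hg'
    · simp only [gfind, if_pos hx]
    · have hx0 : x ∉ g0.2 := fun hx0 => hd g hg' x hx0 hx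
      simp only [gfind, if_neg hx0]
      exact ih hp g hg' x hx

theorem gfind_some : ∀ (gs : List (String × List String)) (x o : String),
    gfind gs x = some o → ∃ g ∈ gs, x ∈ g.2 ∧ g.1 = o := by
  intro gs
  induction gs with
  | nil => intro x o h; simp [gfind] at h
  | cons g0 gs ih =>
    intro x o h
    by_cases hx : x ∈ g0.2
    · simp only [gfind, if_pos hx, Option.some.injEq] at h
      exact ⟨g0, List.mem_cons_self, hx, h⟩
    · simp only [gfind, if_neg hx] at h
      obtain ⟨g, hg, h1, h2⟩ := ih x o h
      exact ⟨g, List.mem_cons_of_mem _ hg, h1, h2⟩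

theorem owners_filter (adj : PySem.Dict String (List String)) (F : String → String) :
    ∀ (ks : List String) (v : PySem.Set String),
      (∀ g ∈ groups adj ks v, ∀ x ∈ g.2, F x = g.1) →
      (∀ k ∈ ks, k ∈ v → F k ≠ k) → ks.Nodup →
      ks.filter (fun k => F k == k) = (groups adj ks v).map (·.1) := by
  intro ks
  induction ks with
  | nil => intro v _ _ _; simp [groups]
  | cons n rest ih =>
    intro v hF hv hnd
    by_cases hn : n ∈ v
    · have hFn : F n ≠ n := hv n List.mem_cons_self hn
      have hc : v.contains n = true := (PySem.Set.contains_iff v n).mpr hn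
      simp only [groups, hc, if_true] at hF ⊢
      rw [List.filter_cons, if_neg (by simp [hFn])]
      exact ih v hF (fun k hk => hv k (List.mem_cons_of_mem _ hk)) (List.Nodup.of_cons hnd)
    · have hc : v.contains n = false := by
        rcases h' : v.contains n with _ | _
        · rfl
        · exact absurd ((PySem.Set.contains_iff v n).mp h') hn
      simp only [groups, hc, Bool.false_eq_true, if_false] at hF ⊢
      obtain ⟨c1, c2, c3⟩ := grabList_spec (adj.getD n []) (v.add n)
      have hFn : F n = n := hF _ List.mem_cons_self n List.mem_cons_self
      rw [List.filter_cons, if_pos (by simp [hFn]), List.map_cons]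
      congr 1
      have hnr : n ∉ rest := (List.nodup_cons.mp hnd).1
      refine ih (grabList (v.add n) (adj.getD n [])).1
        (fun g hg x hx => hF g (List.mem_cons_of_mem _ hg) x hx) ?_ (List.Nodup.of_cons hnd)
      intro k hk hkp
      rcases (c1 k).mp hkp with ha | hp2
      · rcases (PySem.Set.mem_add v n k).mp ha with hkv | rfl
        · exact hv k (List.mem_cons_of_mem _ hk) hkv
        · exact absurd hk hnr
      · have hFk : F k = n := hF _ List.mem_cons_self k (List.mem_cons_of_mem _ hp2)
        have : k ≠ n := fun he => hnr (he ▸ hk)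
        rw [hFk]
        exact fun he => this he.symm

theorem ord_aux (adj : PySem.Dict String (List String)) (F : String → String) :
    ∀ (ks : List String) (v : PySem.Set String) (pre : List String),
      (∀ g ∈ groups adj ks v, ∀ x ∈ g.2, F x = g.1) →
      (∀ k, k ∈ v → F k ∈ pre) →
      ∀ pre' x post, ks = pre' ++ x :: post → F x = x ∨ F x ∈ pre ++ pre' := by
  intro ks
  induction ks with
  | nil =>
    intro v pre _ _ pre' x post heq
    exact absurd heq (by simp)
  | cons n rest ih =>
    intro v pre hF hv pre' x post heq
    by_cases hn : n ∈ v
    · -- n claimed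
      have hc : v.contains n = true := (PySem.Set.contains_iff v n).mpr hn
      simp only [groups, hc, if_true] at hF
      cases pre' with
      | nil =>
        simp only [List.nil_append, List.cons.injEq] at heq
        obtain ⟨rfl, rfl⟩ := heq
        right
        simpa using hv _ hn
      | cons m pre'' =>
        simp only [List.cons_append, List.cons.injEq] at heq
        obtain ⟨rfl, hrest⟩ := heq
        rcases ih v (pre ++ [n]) hF
            (fun k hk => List.mem_append_left _ (hv k hk)) pre'' x post hrest with h1 | h2
        · exact Or.inl h1
        · right
          rw [List.append_assoc] at h2
          simpa using h2
    · have hc : v.contains n = false := by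
        rcases h' : v.contains n with _ | _
        · rfl
        · exact absurd ((PySem.Set.contains_iff v n).mp h') hn
      simp only [groups, hc, Bool.false_eq_true, if_false] at hF
      obtain ⟨c1, c2, c3⟩ := grabList_spec (adj.getD n []) (v.add n)
      have hFn : F n = n := hF _ List.mem_cons_self n List.mem_cons_self
      cases pre' with
      | nil =>
        simp only [List.nil_append, List.cons.injEq] at heq
        obtain ⟨rfl, rfl⟩ := heq
        exact Or.inl hFn
      | cons m pre'' =>
        simp only [List.cons_append, List.cons.injEq] at heq
        obtain ⟨rfl, hrest⟩ := heq
        have hv' : ∀ k, k ∈ (grabList (v.add n) (adj.getD n [])).1 → F k ∈ pre ++ [n] := by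
          intro k hkp
          rcases (c1 k).mp hkp with ha | hp2
          · rcases (PySem.Set.mem_add v n k).mp ha with hkv | rfl
            · exact List.mem_append_left _ (hv k hkv)
            · rw [hFn]; simp
          · rw [hF _ List.mem_cons_self k (List.mem_cons_of_mem _ hp2)]; simp
        rcases ih (grabList (v.add n) (adj.getD n [])).1 (pre ++ [n])
            (fun g hg y hy => hF g (List.mem_cons_of_mem _ hg) y hy) hv' pre'' x post
            hrest with h1 | h2
        · exact Or.inl h1
        · right
          rw [List.append_assoc] at h2
          simpa using h2

-- ---- the aggregation loop computes specL ----
theorem specL_append_new (F : String → String) (done : List (String × Int)) (x : String)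
    (c : Int) (hself : F x = x) (hx0 : x ∉ done.map (·.1))
    (hx2 : ∀ k ∈ done.map (·.1), F k ≠ x) :
    specL F (done ++ [(x, c)]) = specL F done ++ [(x, c)] := by
  unfold specL
  rw [show ((done ++ [(x, c)]).map (·.1)) = done.map (·.1) ++ [x] by simp,
    List.filter_append, show [x].filter (fun k => F k == k) = [x] by simp [hself],
    List.map_append]
  congr 1
  · apply List.map_congr_left
    intro o ho
    have ho1 : o ∈ done.map (·.1) := List.mem_of_mem_filter ho
    have hne : x ≠ o := fun h => hx0 (h ▸ ho1)
    have hfil : (done ++ [(x, c)]).filter (fun p => F p.1 == o) =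
        done.filter (fun p => F p.1 == o) := by
      rw [List.filter_append]
      simp [hself, hne]
    rw [hfil]
  · have hdone : done.filter (fun p => F p.1 == x) = [] :=
      List.filter_eq_nil_iff.mpr (fun p hp => by
        simp only [beq_iff_eq]
        exact hx2 p.1 (List.mem_map_of_mem hp))
    simp [List.filter_append, hdone, hself]

theorem specL_append_old (F : String → String) (done : List (String × Int)) (x : String)
    (c : Int) (ho : F x ≠ x) :
    specL F (done ++ [(x, c)]) =
      (specL F done).map (fun p => if p.1 == F x then (F x, p.2 + c) else p) := by
  unfold specL
  rw [show ((done ++ [(x, c)]).map (·.1)) = done.map (·.1) ++ [x] by simp,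
    List.filter_append, show [x].filter (fun k => F k == k) = [] by simp [ho],
    List.append_nil, List.map_map]
  apply List.map_congr_left
  intro o ho'
  have hoo : F o = o := by simpa using (List.mem_filter.mp ho').2
  by_cases hox : o = F x
  · have hb : (o == F x) = true := by simp [hox]
    simp only [Function.comp_apply, hb, if_true]
    rw [List.filter_append, show [(x, c)].filter (fun p => F p.1 == o) = [(x, c)] by
      simp [hox], List.map_append, List.sum_append, hox]
    simp
  · have hb : (o == F x) = false := by simp [hox]
    simp only [Function.comp_apply, hb, Bool.false_eq_true, if_false]
    rw [List.filter_append, show [(x, c)].filter (fun p => F p.1 == o) = [] by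
      simp [Ne.symm hox], List.append_nil]

theorem specL_keys (F : String → String) (done : List (String × Int)) :
    (specL F done).map (·.1) = (done.map (·.1)).filter (fun k => F k == k) := by
  simp [specL, List.map_map, Function.comp_def]

theorem agg_loop (F : String → String) (items : List (String × Int))
    (hnd : (items.map (·.1)).Nodup)
    (H : ∀ pre x post, items.map (·.1) = pre ++ x :: post →
      F x = x ∨ (F x ∈ pre ∧ F (F x) = F x)) :
    ∀ (rest done : List (String × Int)), done ++ rest = items →
      rest.foldl (fun res p => res.insert (F p.1) (res.getD (F p.1) 0 + p.2))
          (PySem.Dict.mk (specL F done)) =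
        PySem.Dict.mk (specL F (done ++ rest)) := by
  intro rest
  induction rest with
  | nil => intro done hdone; rw [List.append_nil]; rfl
  | cons pc rest' ih =>
    obtain ⟨x, c⟩ := pc
    intro done hdone
    have hsplit : items.map (·.1) = done.map (·.1) ++ x :: rest'.map (·.1) := by
      rw [← hdone]; simp
    have hnd' := hnd
    rw [hsplit] at hnd'
    have hdk : (done.map (·.1)).Nodup := (List.nodup_append.mp hnd').1
    have hx0 : x ∉ done.map (·.1) := by
      have := List.nodup_middle.mp hnd'
      exact fun ha => (List.nodup_cons.mp this).1 (List.mem_append_left _ ha)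
    have hknd : ((specL F done).map (·.1)).Nodup := by
      rw [specL_keys]; exact hdk.filter _
    have hstep : (PySem.Dict.mk (specL F done)).insert (F x)
        ((PySem.Dict.mk (specL F done)).getD (F x) 0 + c) =
        PySem.Dict.mk (specL F (done ++ [(x, c)])) := by
      rcases H (done.map (·.1)) x (rest'.map (·.1)) hsplit with hself | ⟨hpre, hidem⟩
      · have hx2 : ∀ k ∈ done.map (·.1), F k ≠ x := by
          intro k hk
          obtain ⟨p1, p2, h12⟩ := List.mem_iff_append.mp hk
          have hks : items.map (·.1) = p1 ++ k :: (p2 ++ x :: rest'.map (·.1)) := by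
            rw [hsplit, h12]; simp
          rcases H p1 k _ hks with h1 | ⟨h2, _⟩
          · rw [h1]; exact fun he => hx0 (he ▸ hk)
          · intro he
            apply hx0
            rw [h12]
            exact List.mem_append_left _ (he ▸ h2)
        have hcx : (PySem.Dict.mk (specL F done)).contains (F x) = false := by
          rw [hself, PySem.Dict.contains_eq_decide_mem_keys, PySem.Dict.keys_mk]
          have hkk : (specL F done).map (fun p => p.1) =
              (done.map (·.1)).filter (fun k => F k == k) := specL_keys F done
          rw [hkk]
          simp only [decide_eq_false_iff_not, List.mem_filter]
          exact fun hmem => hx0 hmem.1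
        apply PySem.Dict.ext
        rw [PySem.Dict.items_insert_of_not_contains _ _ hcx,
          specL_append_new F done x c hself hx0 hx2,
          getD_of_not_contains _ _ hcx, zero_add, hself]
      · have ho : F x ≠ x := fun he => hx0 (he ▸ hpre)
        have hoin : F x ∈ (specL F done).map (·.1) := by
          rw [specL_keys]; exact List.mem_filter.mpr ⟨hpre, by simp [hidem]⟩
        have hcx : (PySem.Dict.mk (specL F done)).contains (F x) = true := by
          rw [PySem.Dict.contains_eq_decide_mem_keys, PySem.Dict.keys_mk]
          simpa using hoin
        apply PySem.Dict.ext
        rw [PySem.Dict.items_insert_of_contains _ _ hcx, specL_append_old F done x c ho]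
        apply List.map_congr_left
        intro p hp
        by_cases hpo : p.1 = F x
        · have hb : (p.1 == F x) = true := by simp [hpo]
          have hpe : (F x, p.2) = p := by rw [← hpo]
          have hgd : (PySem.Dict.mk (specL F done)).getD (F x) 0 = p.2 := by
            have hm : (F x, p.2) ∈ (PySem.Dict.mk (specL F done)).items := by
              rw [hpe]; exact hp
            exact PySem.Dict.getD_of_mem_items _ hm
              (by rw [PySem.Dict.keys_mk]; exact hknd) 0
          simp only [hb, if_true, hgd]
        · have hb : (p.1 == F x) = false := by simp [hpo]
          simp [hb]
    simp only [List.foldl_cons]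
    rw [hstep, ih (done ++ [(x, c)]) (by rw [← hdone]; simp), List.append_assoc,
      List.singleton_append]

theorem sum_getD_filter (counts : PySem.Dict String Int) :
    ∀ mem : List String, sumMem counts mem =
      ((mem.filter (fun x => decide (x ∈ counts.keys))).map (fun x => counts.getD x 0)).sum := by
  intro mem
  induction mem with
  | nil => simp [sumMem]
  | cons y t ih =>
    simp only [sumMem, List.map_cons, List.sum_cons, List.filter_cons]
    by_cases hy : y ∈ counts.keys
    · rw [if_pos (by simpa using hy), List.map_cons, List.sum_cons,
        show (t.map (fun x => counts.getD x 0)).sum = sumMem counts t from rfl, ih]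
    · have h0 : counts.getD y 0 = 0 := by
        rw [PySem.Dict.getD_eq_get?_getD,
          (PySem.Dict.get?_eq_none_iff_not_mem_keys _ _).mpr hy]
        rfl
      rw [if_neg (by simpa using hy), h0, zero_add,
        show (t.map (fun x => counts.getD x 0)).sum = sumMem counts t from rfl, ih]

theorem key_eq (counts : PySem.Dict String Int) (adj : PySem.Dict String (List String))
    (nm : PySem.Dict String PyNode) (hinv : NodeInv nm counts PySem.Set.empty adj)
    (hnd : counts.keys.Nodup) :
    (walk_list counts.items nm PySem.Dict.empty).items =
      (counts.items.foldl (agg_step (build_owner adj counts.keys PySem.Dict.empty))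
        PySem.Dict.empty).items := by
  have hks' : counts.items.map (·.1) = counts.keys := rfl
  set ks := counts.keys with hks
  set O := build_owner adj ks PySem.Dict.empty with hO
  set gs := groups adj ks PySem.Set.empty with hgs
  set Fo := fun x => (O.get? x).getD x with hFo
  have hempty : ∀ x : String, (PySem.Dict.empty : PySem.Dict String String).contains x = true ↔
      x ∈ (PySem.Set.empty : PySem.Set String) := by
    intro x
    simp [PySem.Dict.contains_empty, PySem.Set.empty]
  have hOx : ∀ x, O.get? x = gfind gs x := by
    intro x
    have h := owner_main adj ks PySem.Dict.empty PySem.Set.empty hempty x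
    simpa [PySem.Set.empty] using h
  obtain ⟨hG1, hG2⟩ := groups_spec adj ks PySem.Set.empty
  have hF5 : ∀ g ∈ gs, ∀ x ∈ g.2, Fo x = g.1 := by
    intro g hg x hx
    show (O.get? x).getD x = g.1
    rw [hOx x, gfind_eq_of_mem gs hG2 g hg x hx]
    rfl
  have hFown : ∀ g ∈ gs, Fo g.1 = g.1 := fun g hg => hF5 g hg g.1 (hG1 g hg).2.2
  have hvac : ∀ k ∈ ks, k ∈ (PySem.Set.empty : PySem.Set String) → Fo k ≠ k := by
    intro k _ hk
    simp [PySem.Set.empty] at hk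
  have hOF : ks.filter (fun k => Fo k == k) = gs.map (·.1) :=
    owners_filter adj Fo ks PySem.Set.empty hF5 hvac hnd
  have hOwnersNodup : (gs.map (·.1)).Nodup := hOF ▸ hnd.filter _
  have huniq : ∀ g ∈ gs, ∀ g' ∈ gs, g.1 = g'.1 → g = g' := by
    intro g hg g' hg' he
    by_contra hne
    have hpw : gs.Pairwise (fun a b => a.1 ≠ b.1) := List.pairwise_map.mp hOwnersNodup
    exact (hpw.forall (fun {a b} h he' => h he'.symm) hg hg' hne) he
  have hcover : ∀ k ∈ ks, ∃ g ∈ gs, k ∈ g.2 := by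
    intro k hk
    rcases groups_cover adj ks PySem.Set.empty k hk with hv | h
    · simp [PySem.Set.empty] at hv
    · exact h
  have hH : ∀ pre x post, counts.items.map (·.1) = pre ++ x :: post →
      Fo x = x ∨ (Fo x ∈ pre ∧ Fo (Fo x) = Fo x) := by
    intro pre x post hsp
    rw [hks'] at hsp
    rcases ord_aux adj Fo ks PySem.Set.empty [] hF5
        (by intro k hk; simp [PySem.Set.empty] at hk) pre x post hsp with h1 | h2
    · exact Or.inl h1
    · simp only [List.nil_append] at h2
      by_cases hself : Fo x = x
      · exact Or.inl hself
      · refine Or.inr ⟨h2, ?_⟩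
        cases hgo : O.get? x with
        | none => exact absurd (by simp [hFo, hgo]) hself
        | some o =>
          have hfx : Fo x = o := by simp [hFo, hgo]
          obtain ⟨g, hg, hxg, hgo1⟩ := gfind_some gs x o (by rw [← hOx x]; exact hgo)
          rw [hfx, ← hgo1]
          exact hFown g hg
  have hsum : ∀ g ∈ gs, ((counts.items.filter (fun p => Fo p.1 == g.1)).map (·.2)).sum
      = sumMem counts g.2 := by
    intro g hg
    have hitems : counts.items = ks.map (fun k => (k, counts.getD k 0)) :=
      PySem.Dict.items_eq_map_keys counts hnd 0
    rw [hitems, List.filter_map, List.map_map]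
    simp only [Function.comp_def]
    have hperm : (ks.filter (fun k => Fo k == g.1)).Perm
        (g.2.filter (fun x => decide (x ∈ ks))) := by
      refine (List.perm_ext_iff_of_nodup (hnd.filter _) ((hG1 g hg).2.1.filter _)).mpr ?_
      intro a
      simp only [List.mem_filter, beq_iff_eq, decide_eq_true_eq]
      constructor
      · rintro ⟨ha, hfa⟩
        obtain ⟨g', hg', hag'⟩ := hcover a ha
        have hgg : g' = g := huniq g' hg' g hg (by rw [hF5 g' hg' a hag'] at hfa; exact hfa)
        exact ⟨hgg ▸ hag', ha⟩
      · rintro ⟨hag, ha⟩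
        exact ⟨ha, hF5 g hg a hag⟩
    rw [sum_getD_filter counts g.2]
    exact (hperm.map (fun k => counts.getD k 0)).sum_eq
  have hAstep : agg_step O =
      fun (res : PySem.Dict String Int) p => res.insert (Fo p.1) (res.getD (Fo p.1) 0 + p.2) :=
    rfl
  have hagg := agg_loop Fo counts.items (hks' ▸ hnd) hH counts.items [] rfl
  have hBitems : (counts.items.foldl (agg_step O) PySem.Dict.empty).items =
      specL Fo counts.items := by
    rw [hAstep]
    have h0 : (PySem.Dict.empty : PySem.Dict String Int) = PySem.Dict.mk (specL Fo []) := by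
      have : specL Fo [] = [] := by simp [specL]
      rw [this]
      rfl
    rw [h0, hagg]
    simp
  rw [walk_groups counts adj counts.items nm PySem.Set.empty PySem.Dict.empty hinv, hBitems]
  have hLitems : (groupsFold counts PySem.Dict.empty gs).items =
      gs.map (fun g => (g.1, sumMem counts g.2)) := by
    unfold groupsFold
    rw [PySem.Dict.items_foldl_insert_fresh gs (fun g => g.1) (fun g => sumMem counts g.2)
      PySem.Dict.empty (fun a _ => by simp) hOwnersNodup]
    rfl
  rw [show groups adj (counts.items.map (·.1)) PySem.Set.empty = gs by rw [hks'], hLitems]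
  unfold specL
  rw [hks', hOF, List.map_map]
  apply List.map_congr_left
  intro g hg
  simp only [Function.comp_def]
  rw [hsum g hg]

-- ===== VERDICT (by name: the statement is the Claim_ definition above) =====
theorem create_name_list2_spec : Claim_equal_create_name_list2 := by
  intro names synonyms _
  unfold Spec_create_name_list2
  exact key_eq (namesDict names) (build_adj synonyms) _ (build_inv names synonyms)
    (namesDict_keys_nodup names)
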